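-- pv_equiv track=rewrite | github.com/ANMillerIII/Practice-Problems | word.py | get_sorted_nums
-- ===== SOURCE A (Python) =====
-- WORD_MAP = {
--     0: "zero",
--     1: "one",
--     2: "two",
--     3: "three",
--     4: "four",
--     5: "five",
--     6: "six",
--     7: "seven",
--     8: "eight",
--     9: "nine",
-- }
--
-- def get_char_count_dict(string):
--     letter_dict = dict()
--     for char in string:
--         if char not in letter_dict:
--             letter_dict[char] = 0
--         letter_dict[char] += 1
--     return letter_dict
--
-- def use_digit(letter_dict, word_dict, digit):
--     for char in word_dict:
--         if char not in letter_dict or word_dict[char] > letter_dict[char]: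
--             return letter_dict, 0
--
--     for char in word_dict:
--         letter_dict[char] -= word_dict[char]
--
--     letter_dict, uses = use_digit(letter_dict, word_dict, digit)
--     return letter_dict, uses + 1
--
-- def get_sorted_nums(string):
--     letter_dict = get_char_count_dict(string)
--
--     result = 0
--     for i in range(10):
--         word = WORD_MAP[i]
--         word_dict = get_char_count_dict(word)
--         letter_dict, uses = use_digit(letter_dict, word_dict, i)
--
--         while uses > 0:
--             result = result * 10 + i
--             uses -= 1
--
--     return result
-- ===== SOURCE B (Python) =====
-- WORD_MAP = {
--     0: "zero",
--     1: "one",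
--     2: "two",
--     3: "three",
--     4: "four",
--     5: "five",
--     6: "six",
--     7: "seven",
--     8: "eight",
--     9: "nine",
-- }
--
-- def get_sorted_nums(string):
--     counts = {}
--     for c in string:
--         counts[c] = counts.get(c, 0) + 1
--
--     result = 0
--     for i in range(10):
--         word = WORD_MAP[i]
--         need = {}
--         for c in word:
--             need[c] = need.get(c, 0) + 1
--         # how many copies of `word` fit: one division per distinct letter
--         uses = min(counts.get(c, 0) // n for c, n in need.items())
--         for c, n in need.items():
--             counts[c] = counts.get(c, 0) - n * uses
--         # append digit i `uses` times: result * 10^uses + i * repunit(uses)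
--         result = result * 10 ** uses + i * (10 ** uses - 1) // 9
--     return result
-- ===== Notes on version B (the rewrite author's own statement) =====
-- stated objective: alternative
-- what changed: Replaces A's recursive repeated-subtraction of each word's letter counts (one recursion level and one dict pass per formable copy, plus one result*10+i step per output digit) by a single floor-division per distinct letter (uses = min(counts[c] // need[c])) and a closed-form digit append (result * 10**uses + i * repunit(uses)); it trades recursion depth proportional to the answer for ten constant-size arithmetic steps.
import Mathlib
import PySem

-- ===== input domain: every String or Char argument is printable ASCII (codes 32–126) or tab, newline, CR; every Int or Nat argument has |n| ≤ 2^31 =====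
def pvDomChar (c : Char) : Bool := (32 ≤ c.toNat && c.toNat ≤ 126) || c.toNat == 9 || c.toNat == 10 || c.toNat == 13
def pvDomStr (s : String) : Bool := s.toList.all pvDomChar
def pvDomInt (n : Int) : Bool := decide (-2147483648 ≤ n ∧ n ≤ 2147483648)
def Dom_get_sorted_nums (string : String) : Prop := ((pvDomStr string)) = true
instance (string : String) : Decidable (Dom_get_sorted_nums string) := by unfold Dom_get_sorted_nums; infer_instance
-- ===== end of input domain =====

-- B replaces A's recursive repeated-subtraction per digit by one floor-division per distinct
-- letter (uses = min(count[c] // need[c])) and a closed-form digit append; objective: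
-- alternative (direct arithmetic instead of recursion whose depth is the digit count).

-- shared constant (the module-level WORD_MAP literal, used by both programs)
def WORD_MAP : PySem.Dict Int String :=
  PySem.Dict.ofList [(0, "zero"), (1, "one"), (2, "two"), (3, "three"), (4, "four"),
                     (5, "five"), (6, "six"), (7, "seven"), (8, "eight"), (9, "nine")]

-- ===== PORT A =====
def get_char_count_dict (string : String) : PySem.Dict Char Int :=
  string.toList.foldl (fun letter_dict char =>
    let letter_dict := if letter_dict.contains char then letter_dict else letter_dict.insert char 0
    letter_dict.insert char (letter_dict.getD char 0 + 1)) PySem.Dict.empty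

-- fuel is a totality guard only: each recursive call removes ≥ 1 letter from letter_dict's mass
-- (≤ string.length at every call site), so fuel = string.length + 1 is never exhausted.
def use_digit (fuel : Nat) (letter_dict word_dict : PySem.Dict Char Int) (digit : Int) :
    PySem.Dict Char Int × Int :=
  match fuel with
  | 0 => (letter_dict, 0)
  | fuel + 1 =>
    -- first for-loop with early return: any failing char aborts with (letter_dict, 0)
    if word_dict.keys.any (fun char =>
        !letter_dict.contains char || word_dict.getD char 0 > letter_dict.getD char 0) then
      (letter_dict, 0)
    else
      -- second for-loop: letter_dict[char] -= word_dict[char]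
      let letter_dict := word_dict.keys.foldl
        (fun d char => d.insert char (d.getD char 0 - word_dict.getD char 0)) letter_dict
      let r := use_digit fuel letter_dict word_dict digit
      (r.1, r.2 + 1)

-- the inner `while uses > 0: result = result * 10 + i; uses -= 1`
def while_uses (result : Int) (i : Int) (uses : Int) : Int :=
  if uses > 0 then while_uses (result * 10 + i) i (uses - 1) else result
termination_by uses.toNat
decreasing_by omega

def get_sorted_nums (string : String) : Int :=
  let letter_dict := get_char_count_dict string
  let st := (PySem.List.pyRange 0 10 1).foldl (fun (st : PySem.Dict Char Int × Int) i =>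
    let word := (WORD_MAP.get? i).getD ""   -- WORD_MAP[i]; key always present for i ∈ range(10)
    let word_dict := get_char_count_dict word
    let r := use_digit (string.toList.length + 1) st.1 word_dict i
    (r.1, while_uses st.2 i r.2)) (letter_dict, 0)
  st.2

-- ===== PORT B =====
def get_sorted_nums_alt (string : String) : Int :=
  let counts := string.toList.foldl (fun d c => d.insert c (d.getD c 0 + 1))
    (PySem.Dict.empty : PySem.Dict Char Int)
  let st := (PySem.List.pyRange 0 10 1).foldl (fun (st : PySem.Dict Char Int × Int) i =>
    let word := (WORD_MAP.get? i).getD ""   -- WORD_MAP[i]; key always present for i ∈ range(10)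
    let need := word.toList.foldl (fun d c => d.insert c (d.getD c 0 + 1))
      (PySem.Dict.empty : PySem.Dict Char Int)
    -- uses = min(counts.get(c, 0) // n for c, n in need.items())  (need is never empty)
    let uses := (PySem.List.min? (need.items.map
      (fun (p : Char × Int) => PySem.Int.floordiv (st.1.getD p.1 0) p.2)) (fun x => x)).getD 0
    let counts := need.items.foldl (fun d p => d.insert p.1 (d.getD p.1 0 - p.2 * uses)) st.1
    -- result = result * 10 ** uses + i * (10 ** uses - 1) // 9   (uses ≥ 0, so toNat is exact)
    (counts, st.2 * 10 ^ uses.toNat + PySem.Int.floordiv (i * (10 ^ uses.toNat - 1)) 9))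
    (counts, 0)
  st.2

-- ===== PRECONDITION & SPEC =====
def Spec_get_sorted_nums (string : String) (out : Int) : Prop := out = get_sorted_nums_alt string
instance (string : String) (out : Int) : Decidable (Spec_get_sorted_nums string out) := by unfold Spec_get_sorted_nums; infer_instance

-- ===== CLAIM (what is proved, stated in full; the proofs are below) =====
def Claim_equal_get_sorted_nums : Prop := ∀ (string : String), Dom_get_sorted_nums string → Spec_get_sorted_nums string (get_sorted_nums string)

-- ===== LEMMAS AND PROOFS =====


-- A's counter: getD = count
lemma counterA_getD (l : List Char) (d : PySem.Dict Char Int) (c : Char) :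
    (l.foldl (fun letter_dict char =>
      let letter_dict := if letter_dict.contains char then letter_dict else letter_dict.insert char 0
      letter_dict.insert char (letter_dict.getD char 0 + 1)) d).getD c 0
    = d.getD c 0 + l.count c := by
  induction l generalizing d with
  | nil => simp
  | cons x t ih =>
    simp only [List.foldl_cons, ih]
    by_cases hx : d.contains x = true
    · simp only [hx, if_true, PySem.Dict.getD_insert]
      by_cases hcx : c = x
      · subst hcx; simp; ring
      · simp [hcx, Ne.symm hcx]
    · simp only [Bool.not_eq_true] at hx
      simp only [hx, Bool.false_eq_true, if_false, PySem.Dict.getD_insert]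
      by_cases hcx : c = x
      · subst hcx
        simp [PySem.Dict.getD_of_not_contains d 0 hx]
        ring
      · simp [hcx, Ne.symm hcx]

-- B's uses expression as a function of the letter dict
def minU (d W : PySem.Dict Char Int) : Int :=
  (PySem.List.min? (W.items.map
    (fun (p : Char × Int) => PySem.Int.floordiv (d.getD p.1 0) p.2)) (fun x => x)).getD 0

def GoodW (W : PySem.Dict Char Int) : Prop :=
  W.keys.Nodup ∧ W.keys ≠ [] ∧ ∀ c ∈ W.keys, 1 ≤ W.getD c 0

lemma minU_nonneg (d W : PySem.Dict Char Int) (hW : GoodW W)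
    (hnn : ∀ c, 0 ≤ d.getD c 0) : 0 ≤ minU d W := by
  unfold minU
  rcases hm : PySem.List.min? (W.items.map
      (fun (p : Char × Int) => PySem.Int.floordiv (d.getD p.1 0) p.2)) (fun x => x) with _ | m
  · simp
  · have hmem := PySem.List.min?_mem hm
    simp only [List.mem_map] at hmem
    obtain ⟨p, hp, rfl⟩ := hmem
    have hp2 : W.getD p.1 0 = p.2 := PySem.Dict.getD_of_mem_items W hp hW.1 0
    have hpos : 1 ≤ p.2 := hp2 ▸ hW.2.2 p.1 (PySem.Dict.mem_keys_of_mem_items W hp)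
    simp only [Option.getD_some]
    rw [PySem.Int.floordiv_eq_ediv_of_pos (by omega)]
    exact Int.ediv_nonneg (hnn p.1) (by omega)

lemma minU_le (d W : PySem.Dict Char Int) (hW : GoodW W) {c : Char} (hc : c ∈ W.keys) :
    minU d W ≤ PySem.Int.floordiv (d.getD c 0) (W.getD c 0) := by
  unfold minU
  obtain ⟨p, hp, hp1⟩ := List.mem_map.mp (show c ∈ W.items.map Prod.fst from hc)
  rcases hm : PySem.List.min? (W.items.map
      (fun (p : Char × Int) => PySem.Int.floordiv (d.getD p.1 0) p.2)) (fun x => x) with _ | m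
  · rw [PySem.List.min?_eq_none_iff, List.map_eq_nil_iff] at hm
    simp [hm] at hp
  · have := PySem.List.min?_isMin hm (PySem.Int.floordiv (d.getD p.1 0) p.2)
      (List.mem_map_of_mem hp)
    have hp2 : W.getD p.1 0 = p.2 := PySem.Dict.getD_of_mem_items W hp hW.1 0
    subst hp1
    simpa [← hp2] using this

lemma one_le_minU (d W : PySem.Dict Char Int) (hW : GoodW W)
    (hfit : ∀ c ∈ W.keys, d.contains c = true ∧ W.getD c 0 ≤ d.getD c 0) :
    1 ≤ minU d W := by
  unfold minU
  rcases hm : PySem.List.min? (W.items.map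
      (fun (p : Char × Int) => PySem.Int.floordiv (d.getD p.1 0) p.2)) (fun x => x) with _ | m
  · rw [PySem.List.min?_eq_none_iff, List.map_eq_nil_iff] at hm
    exact absurd (show W.keys = [] from by simp [PySem.Dict.keys, hm]) hW.2.1
  · have hmem := PySem.List.min?_mem hm
    simp only [List.mem_map] at hmem
    obtain ⟨p, hp, rfl⟩ := hmem
    have hk : p.1 ∈ W.keys := PySem.Dict.mem_keys_of_mem_items W hp
    have hp2 : W.getD p.1 0 = p.2 := PySem.Dict.getD_of_mem_items W hp hW.1 0
    have hpos : 1 ≤ p.2 := hp2 ▸ hW.2.2 p.1 hk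
    simp only [Option.getD_some]
    rw [PySem.Int.le_floordiv_iff_mul_le (by omega), one_mul]
    exact hp2 ▸ (hfit p.1 hk).2

-- A's subtraction loop, generalized over a Nodup key list
lemma foldl_subA (W : PySem.Dict Char Int) (l : List Char) (d : PySem.Dict Char Int)
    (c : Char) (hnd : l.Nodup) :
    (l.foldl (fun d char => d.insert char (d.getD char 0 - W.getD char 0)) d).getD c 0
    = d.getD c 0 - (if c ∈ l then W.getD c 0 else 0) := by
  induction l generalizing d with
  | nil => simp
  | cons x t ih =>
    simp only [List.foldl_cons, ih _ (List.Nodup.of_cons hnd), PySem.Dict.getD_insert]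
    by_cases hcx : c = x
    · subst hcx
      have hct : c ∉ t := (List.nodup_cons.mp hnd).1
      simp [hct]
    · by_cases hct : c ∈ t <;> simp [hcx, hct, List.mem_cons]

-- B's subtraction loop over W.items
lemma foldl_subB (W : PySem.Dict Char Int) (u : Int) :
    ∀ (ps : List (Char × Int)) (d : PySem.Dict Char Int) (c : Char),
    (ps.map Prod.fst).Nodup → (∀ p ∈ ps, W.getD p.1 0 = p.2) →
    (ps.foldl (fun d p => d.insert p.1 (d.getD p.1 0 - p.2 * u)) d).getD c 0
    = d.getD c 0 - (if c ∈ ps.map Prod.fst then W.getD c 0 else 0) * u := by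
  intro ps
  induction ps with
  | nil => simp
  | cons x t ih =>
    intro d c hndp hval
    simp only [List.map_cons, List.nodup_cons] at hndp
    simp only [List.foldl_cons, ih _ _ hndp.2 (fun p hp => hval p (List.mem_cons_of_mem x hp)),
      PySem.Dict.getD_insert]
    by_cases hcx : c = x.1
    · subst hcx
      simp [hndp.1, hval x List.mem_cons_self, List.mem_cons]
    · by_cases hct : c ∈ t.map Prod.fst <;> simp [hcx, hct, List.mem_cons]

-- repunit: rep u = (10^u - 1)/9
def rep : Nat → Int
  | 0 => 0
  | n + 1 => 10 * rep n + 1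

lemma nine_mul_rep (u : Nat) : 9 * rep u = 10 ^ u - 1 := by
  induction u with
  | zero => simp [rep]
  | succ n ih => simp [rep, pow_succ]; omega

lemma while_uses_closed (u : Nat) : ∀ (r i : Int),
    while_uses r i (u : Int) = r * 10 ^ u + i * rep u := by
  induction u with
  | zero => intro r i; rw [while_uses]; simp [rep]
  | succ n ih =>
    intro r i
    rw [while_uses]
    have h1 : ((n : Int) + 1 > 0) := by omega
    simp only [Nat.cast_add, Nat.cast_one, h1, if_pos, add_sub_cancel_right]
    rw [ih]
    have h9 : (10:Int) ^ n = 9 * rep n + 1 := by have := nine_mul_rep n; omega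
    simp only [rep, pow_succ]
    rw [h9]; ring

lemma b_result_eq (r i : Int) (u : Nat) :
    r * 10 ^ u + PySem.Int.floordiv (i * (10 ^ u - 1)) 9 = r * 10 ^ u + i * rep u := by
  rw [← nine_mul_rep, PySem.Int.floordiv_eq_ediv_of_pos (by norm_num)]
  have : i * (9 * rep u) = 9 * (i * rep u) := by ring
  rw [this, Int.mul_ediv_cancel_left _ (by norm_num)]

-- subtracting one copy of the word decrements every floordiv, hence minU
lemma minU_sub (d d' W : PySem.Dict Char Int) (hW : GoodW W)
    (hd' : ∀ c, d'.getD c 0 = d.getD c 0 - W.getD c 0) :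
    minU d' W = minU d W - 1 := by
  unfold minU
  have hmap : W.items.map (fun (p : Char × Int) => PySem.Int.floordiv (d'.getD p.1 0) p.2)
      = (W.items.map (fun (p : Char × Int) => PySem.Int.floordiv (d.getD p.1 0) p.2)).map
        (· - 1) := by
    rw [List.map_map]
    apply List.map_congr_left
    intro p hp
    have hp2 : W.getD p.1 0 = p.2 := PySem.Dict.getD_of_mem_items W hp hW.1 0
    have hpos : 1 ≤ p.2 := hp2 ▸ hW.2.2 p.1 (PySem.Dict.mem_keys_of_mem_items W hp)
    simp only [Function.comp_apply, hd' p.1, hp2]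
    rw [PySem.Int.floordiv_eq_ediv_of_pos (by omega),
        PySem.Int.floordiv_eq_ediv_of_pos (by omega)]
    have : d.getD p.1 0 - p.2 = d.getD p.1 0 + (-1) * p.2 := by ring
    rw [this, Int.add_mul_ediv_right _ _ (by omega)]
    ring
  rw [hmap]
  rcases hm : PySem.List.min? (W.items.map
      (fun (p : Char × Int) => PySem.Int.floordiv (d.getD p.1 0) p.2)) (fun x => x) with _ | m
  · rw [PySem.List.min?_eq_none_iff, List.map_eq_nil_iff] at hm
    exact absurd (show W.keys = [] from by simp [PySem.Dict.keys, hm]) hW.2.1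
  · -- min of (l.map (· - 1)) = min l - 1
    rcases hl : W.items.map (fun (p : Char × Int) => PySem.Int.floordiv (d.getD p.1 0) p.2)
      with _ | ⟨x, t⟩
    · rw [hl, (PySem.List.min?_eq_none_iff ([] : List Int) (fun x => x)).mpr rfl] at hm
      cases hm
    · rw [hl] at hm
      rw [PySem.List.min?_id_cons] at hm
      simp only [List.map_cons, PySem.List.min?_id_cons, Option.getD_some]
      have : ∀ (t : List Int) (x : Int), (t.map (· - 1)).foldl min (x - 1) = t.foldl min x - 1 := by
        intro t
        induction t with
        | nil => simp
        | cons y s ihs =>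
          intro x
          simp only [List.map_cons, List.foldl_cons, ← ihs]
          congr 1
          omega
      rw [this]
      injection hm with hm'
      rw [hm']

lemma getD_eq_zero_of_not_mem_keys (W : PySem.Dict Char Int) {c : Char} (hc : c ∉ W.keys) :
    W.getD c 0 = 0 := by
  apply PySem.Dict.getD_of_not_contains
  rcases h : W.contains c with _ | _
  · rfl
  · exact absurd ((PySem.Dict.contains_iff_mem_keys W c).mp h) hc

lemma use_digit_spec (fuel : Nat) : ∀ (d W : PySem.Dict Char Int) (i : Int),
    GoodW W → (∀ c, 0 ≤ d.getD c 0) → (minU d W).toNat < fuel →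
    (use_digit fuel d W i).2 = minU d W ∧
    ∀ c, (use_digit fuel d W i).1.getD c 0 = d.getD c 0 - W.getD c 0 * minU d W := by
  induction fuel with
  | zero => intro d W i _ _ h; omega
  | succ fuel ih =>
    intro d W i hW hnn hfuel
    by_cases hg : (W.keys.any (fun char =>
        !d.contains char || W.getD char 0 > d.getD char 0)) = true
    · -- guard fails: some needed char missing or short; uses = 0
      have hgeq := hg
      rw [List.any_eq_true] at hg
      obtain ⟨c, hck, hcb⟩ := hg
      have hWc : 1 ≤ W.getD c 0 := hW.2.2 c hck
      have hdc : d.getD c 0 < W.getD c 0 := by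
        rcases Bool.or_eq_true_iff.mp hcb with h | h
        · have : d.contains c = false := by
            cases hcon : d.contains c
            · rfl
            · simp [hcon] at h
          rw [PySem.Dict.getD_of_not_contains d 0 this]; omega
        · simpa using h
      have hzero : minU d W = 0 := by
        have h1 := minU_le d W hW hck
        have h2 := minU_nonneg d W hW hnn
        rw [PySem.Int.floordiv_eq_ediv_of_pos (by omega),
            Int.ediv_eq_zero_of_lt (hnn c) hdc] at h1
        omega
      simp only [use_digit, hgeq, if_true, hzero]
      exact ⟨trivial, fun c' => by ring⟩
    · -- guard passes: one copy subtracted, recurse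
      rw [Bool.not_eq_true, List.any_eq_false] at hg
      have hfit : ∀ c ∈ W.keys, d.contains c = true ∧ W.getD c 0 ≤ d.getD c 0 := by
        intro c hck
        have := hg c hck
        constructor
        · cases hcon : d.contains c
          · simp [hcon] at this
          · rfl
        · simp at this; omega
      have hd' : ∀ c, (W.keys.foldl
          (fun d char => d.insert char (d.getD char 0 - W.getD char 0)) d).getD c 0
          = d.getD c 0 - W.getD c 0 := by
        intro c
        rw [foldl_subA W W.keys d c hW.1]
        by_cases hck : c ∈ W.keys
        · simp [hck]
        · simp [hck, getD_eq_zero_of_not_mem_keys W hck]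
      have hone := one_le_minU d W hW hfit
      have hsub := minU_sub d _ W hW hd'
      have hnn' : ∀ c, 0 ≤ (W.keys.foldl
          (fun d char => d.insert char (d.getD char 0 - W.getD char 0)) d).getD c 0 := by
        intro c
        rw [hd' c]
        by_cases hck : c ∈ W.keys
        · have := (hfit c hck).2; omega
        · rw [getD_eq_zero_of_not_mem_keys W hck]; have := hnn c; omega
      have hfuel' : (minU (W.keys.foldl
          (fun d char => d.insert char (d.getD char 0 - W.getD char 0)) d) W).toNat < fuel := by
        rw [hsub]; omega
      obtain ⟨ihu, ihd⟩ := ih _ W i hW hnn' hfuel'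
      have hguard : (W.keys.any (fun char =>
          !d.contains char || W.getD char 0 > d.getD char 0)) = false := by
        rw [List.any_eq_false]; exact hg
      simp only [use_digit, hguard, Bool.false_eq_true, if_false]
      refine ⟨by rw [ihu, hsub]; ring, fun c => by rw [ihd c, hd' c, hsub]; ring⟩

def wdA (i : Int) : PySem.Dict Char Int :=
  get_char_count_dict ((WORD_MAP.get? i).getD "")

def wdB (i : Int) : PySem.Dict Char Int :=
  ((WORD_MAP.get? i).getD "").toList.foldl (fun d c => d.insert c (d.getD c 0 + 1))
    PySem.Dict.empty

lemma wdA_def (i : Int) : get_char_count_dict ((WORD_MAP.get? i).getD "") = wdA i := rfl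

lemma wdB_def (i : Int) : ((WORD_MAP.get? i).getD "").toList.foldl
    (fun d c => d.insert c (d.getD c 0 + 1)) PySem.Dict.empty = wdB i := rfl

lemma minU_def (d W : PySem.Dict Char Int) :
    (PySem.List.min? (W.items.map
      (fun (p : Char × Int) => PySem.Int.floordiv (d.getD p.1 0) p.2)) (fun x => x)).getD 0
    = minU d W := rfl

lemma minU_congr (d d' W : PySem.Dict Char Int) (h : ∀ c, d.getD c 0 = d'.getD c 0) :
    minU d W = minU d' W := by
  unfold minU
  rw [List.map_congr_left (fun p _ => by rw [h p.1])]

lemma minU_le_ub (d W : PySem.Dict Char Int) (hW : GoodW W) (hnn : ∀ c, 0 ≤ d.getD c 0)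
    {N : Int} (hub : ∀ c, d.getD c 0 ≤ N) : minU d W ≤ N := by
  obtain ⟨c0, hc0⟩ := List.exists_mem_of_ne_nil _ hW.2.1
  have h1 := minU_le d W hW hc0
  have h2 : 1 ≤ W.getD c0 0 := hW.2.2 c0 hc0
  rw [PySem.Int.floordiv_eq_ediv_of_pos (by omega)] at h1
  have h3 := Int.ediv_le_self (W.getD c0 0) (hnn c0)
  have := hub c0
  omega

lemma fold_eq (N : Nat) : ∀ (l : List Int) (dA dB : PySem.Dict Char Int) (rA rB : Int),
    (∀ i ∈ l, GoodW (wdB i) ∧ wdA i = wdB i) →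
    (∀ c, dA.getD c 0 = dB.getD c 0) → (∀ c, 0 ≤ dB.getD c 0) →
    (∀ c, dB.getD c 0 ≤ (N : Int)) → rA = rB →
    (l.foldl (fun (st : PySem.Dict Char Int × Int) i =>
      let word := (WORD_MAP.get? i).getD ""
      let word_dict := get_char_count_dict word
      let r := use_digit (N + 1) st.1 word_dict i
      (r.1, while_uses st.2 i r.2)) (dA, rA)).2
    = (l.foldl (fun (st : PySem.Dict Char Int × Int) i =>
      let word := (WORD_MAP.get? i).getD ""
      let need := word.toList.foldl (fun d c => d.insert c (d.getD c 0 + 1)) PySem.Dict.empty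
      let uses := (PySem.List.min? (need.items.map
        (fun (p : Char × Int) => PySem.Int.floordiv (st.1.getD p.1 0) p.2)) (fun x => x)).getD 0
      let counts := need.items.foldl (fun d p => d.insert p.1 (d.getD p.1 0 - p.2 * uses)) st.1
      (counts, st.2 * 10 ^ uses.toNat + PySem.Int.floordiv (i * (10 ^ uses.toNat - 1)) 9))
      (dB, rB)).2 := by
  intro l
  induction l with
  | nil => intro dA dB rA rB _ _ _ _ hr; simpa using hr
  | cons i t ih =>
    intro dA dB rA rB hGood hAB hnn hub hr
    have hGi := hGood i List.mem_cons_self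
    simp only [List.foldl_cons, wdA_def, wdB_def, minU_def]
    set W := wdB i with hWdef
    rw [hGi.2]
    -- facts about this step
    have hW : GoodW W := hGi.1
    have hminAB : minU dA W = minU dB W := minU_congr dA dB W hAB
    have hnnA : ∀ c, 0 ≤ dA.getD c 0 := fun c => (hAB c) ▸ hnn c
    have hu0 : 0 ≤ minU dB W := minU_nonneg dB W hW hnn
    have hfuel : (minU dA W).toNat < N + 1 := by
      rw [hminAB]
      have := minU_le_ub dB W hW hnn hub
      omega
    obtain ⟨hu, hd⟩ := use_digit_spec (N + 1) dA W i hW hnnA hfuel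
    set u := minU dB W with hudef
    rw [hminAB] at hu hd
    -- B's new dict
    have hBd : ∀ c, (W.items.foldl (fun d p => d.insert p.1 (d.getD p.1 0 - p.2 * u)) dB).getD c 0
        = dB.getD c 0 - W.getD c 0 * u := by
      intro c
      rw [foldl_subB W u W.items dB c (by simpa [PySem.Dict.keys] using hW.1)
        (fun p hp => PySem.Dict.getD_of_mem_items W hp hW.1 0)]
      by_cases hck : c ∈ W.items.map Prod.fst
      · simp [hck]
      · have : W.getD c 0 = 0 := getD_eq_zero_of_not_mem_keys W hck
        simp [hck, this]
    have hWcu : ∀ c, 0 ≤ W.getD c 0 * u ∧ W.getD c 0 * u ≤ dB.getD c 0 := by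
      intro c
      by_cases hck : c ∈ W.keys
      · have h1 : 1 ≤ W.getD c 0 := hW.2.2 c hck
        have h2 := minU_le dB W hW hck
        rw [← hudef] at h2
        have h3 : u * W.getD c 0 ≤ dB.getD c 0 :=
          (PySem.Int.le_floordiv_iff_mul_le (by omega)).mp h2
        constructor
        · positivity
        · nlinarith
      · rw [getD_eq_zero_of_not_mem_keys W hck]
        simpa using hnn c
    -- recurse
    refine ih _ _ _ _ (fun j hj => hGood j (List.mem_cons_of_mem i hj)) ?_ ?_ ?_ ?_
    · intro c; rw [hd c, hBd c, hAB c]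
    · intro c; rw [hBd c]; have := hWcu c; omega
    · intro c; rw [hBd c]; have h1 := (hWcu c).1; have h2 := hub c; omega
    · rw [hu, hr, b_result_eq]
      have h2 := while_uses_closed u.toNat rB i
      rw [Int.toNat_of_nonneg hu0] at h2
      exact h2

lemma counters_eq (string : String) (c : Char) :
    (get_char_count_dict string).getD c 0
    = (string.toList.foldl (fun d c => d.insert c (d.getD c 0 + 1))
        (PySem.Dict.empty : PySem.Dict Char Int)).getD c 0 := by
  rw [PySem.Dict.getD_foldl_insert_add_one]
  unfold get_char_count_dict
  rw [counterA_getD]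

lemma goodW_of_checks (W : PySem.Dict Char Int) (h1 : W.keys.Nodup) (h2 : W.keys ≠ [])
    (h3 : W.items.all (fun p => decide (1 ≤ p.2)) = true) : GoodW W := by
  refine ⟨h1, h2, ?_⟩
  intro c hc
  obtain ⟨p, hp, rfl⟩ := List.mem_map.mp (show c ∈ W.items.map Prod.fst from hc)
  rw [PySem.Dict.getD_of_mem_items W hp h1]
  have := List.all_eq_true.mp h3 p hp
  simpa using this

lemma good_words : ∀ i ∈ PySem.List.pyRange 0 10 1, GoodW (wdB i) ∧ wdA i = wdB i := by
  intro i hi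
  have h : i = 0 ∨ i = 1 ∨ i = 2 ∨ i = 3 ∨ i = 4 ∨ i = 5 ∨ i = 6 ∨ i = 7 ∨ i = 8 ∨ i = 9 := by
    have hr : PySem.List.pyRange 0 10 1 = [0, 1, 2, 3, 4, 5, 6, 7, 8, 9] := by decide
    rw [hr] at hi
    simpa using hi
  rcases h with rfl | rfl | rfl | rfl | rfl | rfl | rfl | rfl | rfl | rfl <;>
    exact ⟨goodW_of_checks _ (by decide) (by decide) (by decide), by decide⟩

lemma main_eq : ∀ (string : String),
    get_sorted_nums string = get_sorted_nums_alt string := by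
  intro string
  unfold get_sorted_nums get_sorted_nums_alt
  refine fold_eq string.toList.length (PySem.List.pyRange 0 10 1) _ _ 0 0 good_words
    (counters_eq string) ?_ ?_ rfl
  · intro c
    rw [PySem.Dict.getD_foldl_insert_add_one]
    simp
  · intro c
    rw [PySem.Dict.getD_foldl_insert_add_one]
    simpa using List.count_le_length (a := c) (l := string.toList)

-- ===== VERDICT (by name: the statement is the Claim_ definition above) =====
theorem get_sorted_nums_spec : Claim_equal_get_sorted_nums :=
  fun string _ => main_eq string
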